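-- pv_equiv track=rewrite | github.com/Pikayue11/AdverseGen | util_gui.py | constraint_conflict
-- ===== SOURCE A (Python) =====
-- def constraint_conflict(map_cons, cur_str):
--     all_constraints = ['l0', 'l2', 'l8', 'ssim']
--     conf1 = {'l0':['ssim'], 'ssim': ['l0']}
--     conf2 = {'l0':{'l2': ['l8'], 'l8':['l2']},
--              'l2':{},
--              'l8': {},
--              'ssim': {}}
--
--     conflicts = []
--     if map_cons[cur_str]:
--         if conf1.__contains__(cur_str):
--             for i in conf1[cur_str]:
--                 if map_cons[i]:
--                     conflicts.append(i)
--
--         for i in all_constraints:   # 在 l0 情况下 选了 l2 或 l8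
--             dict_temp = conf2[i]
--             if dict_temp.__contains__(cur_str):
--                 if map_cons[i]:
--                     for j in dict_temp[cur_str]:
--                         if j not in conflicts:
--                             conflicts.append(j)
--
--             if i == cur_str:        # 在 l8 he l2 情况下 选了 l0
--                 dict_temp = conf2[i]
--                 for j in dict_temp:
--                     if map_cons[j]:
--                         for k in dict_temp[j]:
--                             if map_cons[k]:
--                                 if j not in conflicts:
--                                     conflicts.append(j)
--                                 if k not in conflicts:
--                                     conflicts.append(k)
--
--     return conflicts
-- ===== SOURCE B (Python) =====
-- def constraint_conflict(map_cons, cur_str):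
--     if not map_cons[cur_str]:
--         return []
--     conflicts = []
--     if cur_str == 'l0':
--         if map_cons['ssim']:
--             conflicts.append('ssim')
--         if map_cons['l2'] and map_cons['l8']:
--             conflicts.append('l2')
--             conflicts.append('l8')
--     elif cur_str == 'ssim':
--         if map_cons['l0']:
--             conflicts.append('l0')
--     elif cur_str == 'l2':
--         if map_cons['l0']:
--             conflicts.append('l8')
--     elif cur_str == 'l8':
--         if map_cons['l0']:
--             conflicts.append('l2')
--     return conflicts
-- ===== Notes on version B (the rewrite author's own statement) =====
-- stated objective: simpler
-- what changed: Replaced the conf1/conf2 lookup tables and the nested loop over all constraints with a direct case analysis on cur_str ('l0'/'ssim'/'l2'/'l8') with explicit conflict rules, preserving the exact append order.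
import Mathlib
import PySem

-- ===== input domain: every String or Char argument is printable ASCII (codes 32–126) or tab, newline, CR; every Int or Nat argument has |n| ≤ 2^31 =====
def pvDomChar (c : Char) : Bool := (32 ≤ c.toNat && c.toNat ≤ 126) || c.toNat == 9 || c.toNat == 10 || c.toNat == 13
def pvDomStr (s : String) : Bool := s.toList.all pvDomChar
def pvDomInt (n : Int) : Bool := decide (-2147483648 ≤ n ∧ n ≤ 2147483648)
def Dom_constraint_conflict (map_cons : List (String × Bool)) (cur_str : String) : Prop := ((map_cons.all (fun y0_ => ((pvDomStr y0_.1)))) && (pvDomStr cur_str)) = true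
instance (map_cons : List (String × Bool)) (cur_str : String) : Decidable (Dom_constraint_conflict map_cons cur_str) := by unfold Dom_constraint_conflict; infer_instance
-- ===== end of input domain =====

-- ===== PORT A =====
-- B replaces A's conflict tables and nested loops by direct case rules on cur_str (objective: simpler).
-- A-side helper: dict lookup with Python truthiness default; Pre_ guarantees every key actually read is present.
def pvGetB (map_cons : List (String × Bool)) (k : String) : Bool :=
  (PySem.Dict.get? (PySem.Dict.ofList map_cons) k).getD false

def constraint_conflict (map_cons : List (String × Bool)) (cur_str : String) : List String :=
  let all_constraints : List String := ["l0", "l2", "l8", "ssim"]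
  let conf1 : PySem.Dict String (List String) := PySem.Dict.mk [("l0", ["ssim"]), ("ssim", ["l0"])]
  let conf2 : PySem.Dict String (PySem.Dict String (List String)) :=
    PySem.Dict.mk [("l0", PySem.Dict.mk [("l2", ["l8"]), ("l8", ["l2"])]),
                   ("l2", PySem.Dict.mk []), ("l8", PySem.Dict.mk []),
                   ("ssim", PySem.Dict.mk [])]
  if pvGetB map_cons cur_str then
    let conflicts : List String :=
      if conf1.contains cur_str then
        ((conf1.get? cur_str).getD []).foldl
          (fun acc i => if pvGetB map_cons i then acc ++ [i] else acc) []
      else []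
    all_constraints.foldl (fun conflicts i =>
      let dict_temp := (conf2.get? i).getD (PySem.Dict.ofList [])
      let conflicts :=
        if dict_temp.contains cur_str then
          if pvGetB map_cons i then
            ((dict_temp.get? cur_str).getD []).foldl
              (fun acc j => if acc.contains j then acc else acc ++ [j]) conflicts
          else conflicts
        else conflicts
      if i == cur_str then
        dict_temp.items.foldl (fun acc jk =>
          if pvGetB map_cons jk.1 then
            jk.2.foldl (fun acc k =>
              if pvGetB map_cons k then
                let acc := if acc.contains jk.1 then acc else acc ++ [jk.1]
                if acc.contains k then acc else acc ++ [k]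
              else acc) acc
          else acc) conflicts
      else conflicts) conflicts
  else []

-- ===== PORT B =====
def constraint_conflict_alt (map_cons : List (String × Bool)) (cur_str : String) : List String :=
  if !pvGetB map_cons cur_str then []
  else if cur_str == "l0" then
    (if pvGetB map_cons "ssim" then ["ssim"] else []) ++
    (if pvGetB map_cons "l2" && pvGetB map_cons "l8" then ["l2", "l8"] else [])
  else if cur_str == "ssim" then
    (if pvGetB map_cons "l0" then ["l0"] else [])
  else if cur_str == "l2" then
    (if pvGetB map_cons "l0" then ["l8"] else [])
  else if cur_str == "l8" then
    (if pvGetB map_cons "l0" then ["l2"] else [])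
  else []

-- ===== PRECONDITION & SPEC =====
-- Pre_ excludes exactly the inputs on which Python A raises KeyError: cur_str must be a key of
-- map_cons, and when its value is True the other keys A then reads must be present too.
def Pre_constraint_conflict (map_cons : List (String × Bool)) (cur_str : String) : Prop :=
  (PySem.Dict.get? (PySem.Dict.ofList map_cons) cur_str).isSome = true ∧
  (PySem.Dict.get? (PySem.Dict.ofList map_cons) cur_str = some true →
    (cur_str = "l0" →
      (PySem.Dict.get? (PySem.Dict.ofList map_cons) "ssim").isSome = true ∧
      (PySem.Dict.get? (PySem.Dict.ofList map_cons) "l2").isSome = true ∧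
      (PySem.Dict.get? (PySem.Dict.ofList map_cons) "l8").isSome = true) ∧
    ((cur_str = "ssim" ∨ cur_str = "l2" ∨ cur_str = "l8") →
      (PySem.Dict.get? (PySem.Dict.ofList map_cons) "l0").isSome = true))
instance (map_cons : List (String × Bool)) (cur_str : String) : Decidable (Pre_constraint_conflict map_cons cur_str) := by unfold Pre_constraint_conflict; infer_instance

def pvWitness_constraint_conflict : (List (String × Bool)) × String := ([("l0", false)], "l0")

def Spec_constraint_conflict (map_cons : List (String × Bool)) (cur_str : String) (out : List String) : Prop := out = constraint_conflict_alt map_cons cur_str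
instance (map_cons : List (String × Bool)) (cur_str : String) (out : List String) : Decidable (Spec_constraint_conflict map_cons cur_str out) := by unfold Spec_constraint_conflict; infer_instance

-- ===== CLAIM (what is proved, stated in full; the proofs are below) =====
def Claim_equal_constraint_conflict : Prop := ∀ (map_cons : List (String × Bool)) (cur_str : String), Dom_constraint_conflict map_cons cur_str → Pre_constraint_conflict map_cons cur_str → Spec_constraint_conflict map_cons cur_str (constraint_conflict map_cons cur_str)

-- ===== LEMMAS AND PROOFS =====
-- The two ports agree on ALL inputs (Pre_ is only needed so that Python A returns at all).
lemma ports_agree (map_cons : List (String × Bool)) (cur_str : String) :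
    constraint_conflict map_cons cur_str = constraint_conflict_alt map_cons cur_str := by
  by_cases h0 : cur_str = "l0"
  · subst h0
    cases hc : pvGetB map_cons "l0" <;>
    cases hs : pvGetB map_cons "ssim" <;>
    cases h2 : pvGetB map_cons "l2" <;>
    cases h8 : pvGetB map_cons "l8" <;>
      simp [constraint_conflict, constraint_conflict_alt, hc, hs, h2, h8,
            PySem.Dict.contains, PySem.Dict.get?,
            List.foldl]
  · by_cases hss : cur_str = "ssim"
    · subst hss
      cases hc : pvGetB map_cons "ssim" <;>
      cases hl : pvGetB map_cons "l0" <;>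
        simp [constraint_conflict, constraint_conflict_alt, hc, hl,
              PySem.Dict.contains, PySem.Dict.get?,
              List.foldl]
    · by_cases h2 : cur_str = "l2"
      · subst h2
        cases hc : pvGetB map_cons "l2" <;>
        cases hl : pvGetB map_cons "l0" <;>
          simp [constraint_conflict, constraint_conflict_alt, hc, hl,
                PySem.Dict.contains, PySem.Dict.get?,
                List.foldl]
      · by_cases h8 : cur_str = "l8"
        · subst h8
          cases hc : pvGetB map_cons "l8" <;>
          cases hl : pvGetB map_cons "l0" <;>
            simp [constraint_conflict, constraint_conflict_alt, hc, hl,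
                  PySem.Dict.contains, PySem.Dict.get?,
                  List.foldl]
        · cases hc : pvGetB map_cons cur_str <;>
            simp [constraint_conflict, constraint_conflict_alt, hc,
                  PySem.Dict.contains, PySem.Dict.get?,
                  List.foldl, Ne.symm h0, Ne.symm hss, Ne.symm h2, Ne.symm h8, h0, hss, h2, h8]

-- ===== VERDICT (by name: the statement is the Claim_ definition above) =====
theorem constraint_conflict_spec : Claim_equal_constraint_conflict := by
  intro map_cons cur_str _ _
  unfold Spec_constraint_conflict
  exact ports_agree map_cons cur_str
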